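-- pv_equiv track=rewrite | github.com/princeton-nlp/LitSearch | utils/utils.py | get_s2orc_paragraph_indices
-- ===== SOURCE A (Python) =====
-- from typing import List, Any, Tuple
--
-- def get_s2orc_full_paper(item: dict) -> str:
--     if "content" in item and "text" in item['content'] and item['content']['text'] is not None:
--         return item['content']['text']
--     else:
--         return ""
--
-- def get_s2orc_paragraph_indices(item: dict) -> List[Tuple[int, int]]:
--     text = get_s2orc_full_paper(item)
--     paragraph_indices = []
--     paragraph_start = 0
--     paragraph_end = 0
--     while paragraph_start < len(text):
--         paragraph_end = text.find("\n\n", paragraph_start)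
--         if paragraph_end == -1:
--             paragraph_end = len(text)
--         paragraph_indices.append((paragraph_start, paragraph_end))
--         paragraph_start = paragraph_end + 2
--     return paragraph_indices
-- ===== SOURCE B (Python) =====
-- from typing import List, Tuple
--
-- def get_s2orc_paragraph_indices(item: dict) -> List[Tuple[int, int]]:
--     # Single left-to-right character scan instead of repeated str.find calls.
--     text = item.get("content", {}).get("text") or ""
--     indices = []
--     n = len(text)
--     start = 0
--     i = 0
--     while i < n:
--         if text[i:i+2] == "\n\n":
--             indices.append((start, i))
--             i += 2
--             start = i
--         else:
--             i += 1
--     if start < n: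
--         indices.append((start, n))
--     return indices
-- ===== Notes on version B (the rewrite author's own statement) =====
-- stated objective: alternative
-- what changed: Replaces the while loop of repeated text.find("\n\n", start) calls with a single left-to-right character scan that tests a two-character window and keeps a running paragraph start, emitting the tail piece after the loop.
import Mathlib
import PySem

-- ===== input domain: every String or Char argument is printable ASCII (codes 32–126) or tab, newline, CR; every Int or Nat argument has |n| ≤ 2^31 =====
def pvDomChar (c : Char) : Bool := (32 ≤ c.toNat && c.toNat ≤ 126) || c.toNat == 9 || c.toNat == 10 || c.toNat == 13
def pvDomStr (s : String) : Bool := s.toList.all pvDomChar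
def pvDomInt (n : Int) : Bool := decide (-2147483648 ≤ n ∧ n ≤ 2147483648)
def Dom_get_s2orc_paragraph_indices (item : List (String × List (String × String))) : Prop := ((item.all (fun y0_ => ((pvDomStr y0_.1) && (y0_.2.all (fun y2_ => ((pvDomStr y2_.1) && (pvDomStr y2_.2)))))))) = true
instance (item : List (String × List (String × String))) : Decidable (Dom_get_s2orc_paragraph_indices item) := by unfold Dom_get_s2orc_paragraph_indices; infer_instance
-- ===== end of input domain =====

-- B replaces A's repeated text.find("\n\n", start) scan with one left-to-right character
-- scan keeping a running paragraph start; return values are proved equal on all inputs.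

-- ===== PORT A =====
-- get_s2orc_full_paper: guarded dict lookups ("is not None" is vacuous under the String typing)
def pvFullPaperA (item : List (String × List (String × String))) : String :=
  match (PySem.Dict.mk item).get? "content" with
  | none => ""
  | some content =>
    match (PySem.Dict.mk content).get? "text" with
    | none => ""
    | some t => t

-- paragraph_end = text.find("\n\n", paragraph_start); if -1 then len(text)
def pvFindEnd (cs : List Char) (pstart : Nat) : Nat :=
  let e : Int := PySem.Chars.findFrom cs ['\n', '\n'] (pstart : Int) none
  if e = -1 then cs.length else e.toNat

-- used by loopA's termination proof
theorem pvFindEnd_ge (cs : List Char) (pstart : Nat) (h : pstart ≤ cs.length) :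
    pstart ≤ pvFindEnd cs pstart := by
  unfold pvFindEnd
  by_cases he : PySem.Chars.findFrom cs ['\n', '\n'] (pstart : Int) none = -1
  · simp [he]; omega
  · have hspec := (PySem.Chars.findFrom_natCast_spec cs ['\n', '\n'] pstart h he).1
    rw [if_neg he]
    omega

-- A's while loop
def pvLoopA (cs : List Char) (pstart : Nat) : List (Int × Int) :=
  if h : pstart < cs.length then
    ((pstart : Int), ((pvFindEnd cs pstart : Nat) : Int)) :: pvLoopA cs (pvFindEnd cs pstart + 2)
  else []
termination_by cs.length - pstart
decreasing_by
  have := pvFindEnd_ge cs pstart (Nat.le_of_lt h)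
  omega

def get_s2orc_paragraph_indices (item : List (String × List (String × String))) : List (Int × Int) :=
  pvLoopA (pvFullPaperA item).toList 0

-- ===== PORT B =====
-- text = item.get("content", {}).get("text") or ""
def pvFullPaperB (item : List (String × List (String × String))) : String :=
  (((PySem.Dict.mk ((PySem.Dict.mk item).getD "content" [])).get? "text")).getD ""

-- B's single character scan: while i < n, test text[i:i+2] == "\n\n"; final tail piece after the loop
def pvLoopB (cs : List Char) (i start : Nat) : List (Int × Int) :=
  if _h : i < cs.length then
    if PySem.List.slice cs (some (i : Int)) (some ((i : Int) + 2)) = ['\n', '\n'] then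
      ((start : Int), (i : Int)) :: pvLoopB cs (i + 2) (i + 2)
    else
      pvLoopB cs (i + 1) start
  else
    if start < cs.length then [((start : Int), (cs.length : Int))] else []
termination_by cs.length - i

def get_s2orc_paragraph_indices_alt (item : List (String × List (String × String))) : List (Int × Int) :=
  pvLoopB (pvFullPaperB item).toList 0 0

-- ===== PRECONDITION & SPEC =====
def Spec_get_s2orc_paragraph_indices (item : List (String × List (String × String))) (out : List (Int × Int)) : Prop := out = get_s2orc_paragraph_indices_alt item
instance (item : List (String × List (String × String))) (out : List (Int × Int)) : Decidable (Spec_get_s2orc_paragraph_indices item out) := by unfold Spec_get_s2orc_paragraph_indices; infer_instance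

-- ===== CLAIM (what is proved, stated in full; the proofs are below) =====
def Claim_equal_get_s2orc_paragraph_indices : Prop := ∀ (item : List (String × List (String × String))), Dom_get_s2orc_paragraph_indices item → Spec_get_s2orc_paragraph_indices item (get_s2orc_paragraph_indices item)

-- ===== LEMMAS AND PROOFS =====

theorem pvFullPaper_eq (item : List (String × List (String × String))) :
    pvFullPaperB item = pvFullPaperA item := by
  unfold pvFullPaperA pvFullPaperB
  rcases h : (PySem.Dict.mk item).get? "content" with _ | content
  · simp only [PySem.Dict.get?] at h ⊢
    simp [PySem.Dict.getD_eq_get?_getD, PySem.Dict.get?, h]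
  · simp only [PySem.Dict.getD_eq_get?_getD, h, Option.getD_some]
    rcases h2 : (PySem.Dict.mk content).get? "text" with _ | t <;> simp

-- the slice in B tests a 2-character prefix of cs.drop i
theorem pvSlice_eq (cs : List Char) (i : Nat) :
    PySem.List.slice cs (some (i : Int)) (some ((i : Int) + 2)) = (cs.drop i).take 2 := by
  have : ((i : Int) + 2) = ((i + 2 : Nat) : Int) := by push_cast; ring
  rw [this, PySem.List.slice_natCast]
  congr 1
  omega

-- on region [start, i) with no "\n\n", a match exactly at i makes find return i
theorem pvFindEnd_of_match (cs : List Char) (start i : Nat)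
    (hsi : start ≤ i) (hi : i < cs.length)
    (hmatch : ['\n', '\n'] <+: cs.drop i)
    (hnone : ∀ j, start ≤ j → j < i → ¬ (['\n', '\n'] <+: cs.drop j)) :
    pvFindEnd cs start = i := by
  have hk : start ≤ cs.length := by omega
  unfold pvFindEnd
  rw [PySem.Chars.findFrom_natCast cs ['\n', '\n'] start hk]
  have hinf : PySem.Chars.find (cs.drop start) ['\n', '\n'] ≠ -1 := by
    rw [PySem.Chars.find_ne_neg_one_iff]
    exact List.IsInfix.trans (List.IsPrefix.isInfix hmatch)
      (by rw [show cs.drop i = (cs.drop start).drop (i - start) by rw [List.drop_drop]; congr 1; omega]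
          exact (List.drop_suffix _ _).isInfix)
  have hpos : 0 ≤ PySem.Chars.find (cs.drop start) ['\n', '\n'] := by
    have := PySem.Chars.neg_one_le_find (cs.drop start) ['\n', '\n']
    omega
  obtain ⟨hpre, hmin⟩ := PySem.Chars.find_spec (s := cs.drop start) (sub := ['\n', '\n']) hpos
  set f := (PySem.Chars.find (cs.drop start) ['\n', '\n']).toNat with hf
  have hdd : ∀ m : Nat, (cs.drop start).drop m = cs.drop (start + m) := by
    intro m; rw [List.drop_drop, Nat.add_comm]
  have hfe : f = i - start := by
    by_contra hne
    rcases Nat.lt_or_ge f (i - start) with hlt | hge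
    · have := hnone (start + f) (by omega) (by omega)
      rw [← hdd] at this; exact this hpre
    · have : f ≠ i - start := hne
      have hlt2 : i - start < f := by omega
      have := hmin (i - start) hlt2
      rw [hdd] at this
      have : ¬ (['\n', '\n'] <+: cs.drop i) := by
        rwa [show start + (i - start) = i by omega] at this
      exact this hmatch
  rw [if_neg hinf]
  have hfind : PySem.Chars.find (cs.drop start) ['\n', '\n'] = ((i : Int) - start) := by omega
  rw [hfind, if_neg (by omega)]
  omega

-- no "\n\n" at any j ≥ start: find returns -1, so the end is len(text)
theorem pvFindEnd_of_none (cs : List Char) (start : Nat) (hk : start ≤ cs.length)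
    (hnone : ∀ j, start ≤ j → j < cs.length → ¬ (['\n', '\n'] <+: cs.drop j)) :
    pvFindEnd cs start = cs.length := by
  unfold pvFindEnd
  rw [if_pos]
  rw [PySem.Chars.findFrom_natCast_eq_neg_one_iff cs ['\n', '\n'] start hk]
  intro hinf
  have : PySem.Chars.isIn ['\n', '\n'] (cs.drop start) = true :=
    (PySem.Chars.isIn_iff_infix _ _).mpr hinf
  obtain ⟨j, hj⟩ := (PySem.Chars.exists_prefix_drop_iff_isIn (sub := ['\n', '\n']) (s := cs.drop start)).mpr this
  rw [List.drop_drop] at hj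
  rcases Nat.lt_or_ge (start + j) cs.length with hjl | hjl
  · exact hnone (start + j) (by omega) hjl hj
  · have hlen := hj.length_le
    simp only [List.length_drop, List.length_cons, List.length_nil] at hlen
    omega

-- main loop correspondence
theorem pvLoopB_eq_pvLoopA (cs : List Char) :
    ∀ m i start, cs.length - i ≤ m → start ≤ i →
      (∀ j, start ≤ j → j < i → ¬ (['\n', '\n'] <+: cs.drop j)) →
      pvLoopB cs i start = pvLoopA cs start := by
  intro m
  induction m with
  | zero =>
    intro i start hm hsi hnone
    rw [pvLoopB, pvLoopA]
    have hni : ¬ i < cs.length := by omega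
    rw [dif_neg hni]
    by_cases hs : start < cs.length
    · rw [dif_pos hs, if_pos hs]
      have hend : pvFindEnd cs start = cs.length :=
        pvFindEnd_of_none cs start (by omega) (fun j h1 h2 => hnone j h1 (by omega))
      rw [hend, pvLoopA, dif_neg (by omega)]
    · rw [dif_neg hs, if_neg hs]
  | succ m ih =>
    intro i start hm hsi hnone
    rw [pvLoopB]
    by_cases hi : i < cs.length
    · rw [dif_pos hi, pvSlice_eq]
      by_cases hmatch : (cs.drop i).take 2 = ['\n', '\n']
      · rw [if_pos hmatch]
        have hpre : ['\n', '\n'] <+: cs.drop i := by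
          rw [List.prefix_iff_eq_take]; exact hmatch.symm
        have hend : pvFindEnd cs start = i := pvFindEnd_of_match cs start i hsi hi hpre hnone
        rw [pvLoopA, dif_pos (by omega), hend]
        congr 1
        exact ih (i + 2) (i + 2) (by omega) le_rfl (fun j h1 h2 => by omega)
      · rw [if_neg hmatch]
        refine ih (i + 1) start (by omega) (by omega) ?_
        intro j h1 h2
        by_cases hji : j = i
        · subst hji
          intro hp
          exact hmatch ((List.prefix_iff_eq_take.mp hp).symm)
        · exact hnone j h1 (by omega)
    · rw [dif_neg hi, pvLoopA]
      by_cases hs : start < cs.length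
      · rw [if_pos hs, dif_pos hs]
        have hend : pvFindEnd cs start = cs.length :=
          pvFindEnd_of_none cs start (by omega) (fun j h1 h2 => hnone j h1 (by omega))
        rw [hend, pvLoopA, dif_neg (by omega)]
      · rw [if_neg hs, dif_neg hs]

-- ===== VERDICT (by name: the statement is the Claim_ definition above) =====
theorem get_s2orc_paragraph_indices_spec : Claim_equal_get_s2orc_paragraph_indices := by
  intro item _
  unfold Spec_get_s2orc_paragraph_indices
  unfold get_s2orc_paragraph_indices get_s2orc_paragraph_indices_alt
  rw [pvFullPaper_eq]
  exact (pvLoopB_eq_pvLoopA (pvFullPaperA item).toList ((pvFullPaperA item).toList.length) 0 0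
    (by omega) le_rfl (fun j h1 h2 => by omega)).symm
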